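-- pv_equiv track=rewrite | github.com/svencerovec/AoC-2023 | 1/1.py | replace_last
-- ===== SOURCE A (Python) =====
-- number_dict = {
--         "zero" : "0",
--         "one":"1",
--         "two":"2",
--         "three":"3",
--         "four":"4",
--         "five":"5",
--         "six":"6",
--         "seven":"7",
--         "eight":"8",
--         "nine":"9"
--     }
--
-- def replace_last(line):
--     r_position_dict = {
--         line.rfind("zero") : "zero",
--         line.rfind("one") : "one",
--         line.rfind("two") : "two",
--         line.rfind("three") : "three",
--         line.rfind("four") : "four",
--         line.rfind("five") : "five",
--         line.rfind("six") : "six",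
--         line.rfind("seven") : "seven",
--         line.rfind("eight") : "eight",
--         line.rfind("nine") : "nine"
--     }
--
--     r_found_positions = []
--
--     for position, number in r_position_dict.items():
--         if position != -1:
--             r_found_positions.append(position)
--
--     last_position = max(r_found_positions, default = -1)
--
--     if last_position != -1:
--         line = replace_last_occurence(line, r_position_dict.get(last_position), number_dict.get(r_position_dict.get(last_position)))
--     return line
--
-- def replace_last_occurence(string, old, new):
--     new_list = string.rsplit(old, 1)
--     return new.join(new_list)
-- ===== SOURCE B (Python) =====
-- number_words = [
--     ("zero", "0"), ("one", "1"), ("two", "2"), ("three", "3"), ("four", "4"),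
--     ("five", "5"), ("six", "6"), ("seven", "7"), ("eight", "8"), ("nine", "9"),
-- ]
--
-- def replace_last(line):
--     # Scan start positions from the right; the first index where a number word
--     # starts is the rightmost occurrence of the rightmost number word.
--     for i in range(len(line), -1, -1):
--         for word, digit in number_words:
--             if line.startswith(word, i):
--                 return line[:i] + digit + line[i + len(word):]
--     return line
-- ===== Notes on version B (the rewrite author's own statement) =====
-- stated objective: simpler
-- what changed: A runs ten separate rfind scans, builds a position-keyed dict, takes the max position and re-splits the line with rsplit/join; B makes one right-to-left scan over start indices and splices the digit in at the first (i.e. rightmost) index where a number word starts.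
import Mathlib
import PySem

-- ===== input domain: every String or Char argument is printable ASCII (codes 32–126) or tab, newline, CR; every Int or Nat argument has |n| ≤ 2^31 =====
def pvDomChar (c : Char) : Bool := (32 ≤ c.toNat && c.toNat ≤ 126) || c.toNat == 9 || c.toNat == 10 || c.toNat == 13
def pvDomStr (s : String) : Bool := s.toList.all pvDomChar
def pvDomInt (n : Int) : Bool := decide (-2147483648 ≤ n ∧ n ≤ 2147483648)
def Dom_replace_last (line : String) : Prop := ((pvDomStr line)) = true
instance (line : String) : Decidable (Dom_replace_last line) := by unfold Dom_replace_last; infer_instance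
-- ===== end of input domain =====

-- B replaces A's ten rfind scans + position dict + max by one right-to-left scan for the
-- first index where a number word starts (objective: simpler).

-- ===== PORT A =====
-- number_dict (a dict literal with distinct literal keys)
def pvNumberDict : PySem.Dict (List Char) (List Char) :=
  ⟨[("zero".toList, "0".toList), ("one".toList, "1".toList), ("two".toList, "2".toList),
    ("three".toList, "3".toList), ("four".toList, "4".toList), ("five".toList, "5".toList),
    ("six".toList, "6".toList), ("seven".toList, "7".toList), ("eight".toList, "8".toList),
    ("nine".toList, "9".toList)]⟩

-- the ten (line.rfind(word), word) entries of the r_position_dict literal, in source order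
def pvPosEntries (s : List Char) : List (Int × List Char) :=
  [(PySem.Chars.rfind s "zero".toList, "zero".toList),
   (PySem.Chars.rfind s "one".toList, "one".toList),
   (PySem.Chars.rfind s "two".toList, "two".toList),
   (PySem.Chars.rfind s "three".toList, "three".toList),
   (PySem.Chars.rfind s "four".toList, "four".toList),
   (PySem.Chars.rfind s "five".toList, "five".toList),
   (PySem.Chars.rfind s "six".toList, "six".toList),
   (PySem.Chars.rfind s "seven".toList, "seven".toList),
   (PySem.Chars.rfind s "eight".toList, "eight".toList),
   (PySem.Chars.rfind s "nine".toList, "nine".toList)]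

-- the r_position_dict literal: its entries inserted into an empty dict in order
-- (a dict display with computed, possibly colliding keys = successive insert/overwrite)
def pvPosDict (s : List Char) : PySem.Dict Int (List Char) :=
  (pvPosEntries s).foldl (fun d kv => d.insert kv.1 kv.2) ⟨[]⟩

-- string.rsplit(old, 1) then new.join: rsplit with maxsplit=1 splits at the LAST occurrence
-- of old (found by rfind), exact for the nonempty `old` A passes; then join
def pvReplaceLastOcc (s old neww : List Char) : List Char :=
  let r := PySem.Chars.rfind s old
  let new_list := if r = -1 then [s] else [s.take r.toNat, s.drop (r.toNat + old.length)]
  PySem.Chars.join neww new_list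

def pvACore (s : List Char) : List Char :=
  let d := pvPosDict s
  let r_found := d.items.foldl (fun acc kv => if kv.1 ≠ -1 then acc ++ [kv.1] else acc) []
  let last := PySem.List.maxD r_found id (-1)
  if last ≠ -1 then
    -- dict .get returns the stored word (present, since last is a key); default [] unused
    let old := ((d.get? last).getD [])
    pvReplaceLastOcc s old ((pvNumberDict.get? old).getD [])
  else s

def replace_last (line : String) : String := String.ofList (pvACore line.toList)

-- ===== PORT B =====
def pvNumberWords : List (List Char × List Char) :=
  [("zero".toList, "0".toList), ("one".toList, "1".toList), ("two".toList, "2".toList),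
   ("three".toList, "3".toList), ("four".toList, "4".toList), ("five".toList, "5".toList),
   ("six".toList, "6".toList), ("seven".toList, "7".toList), ("eight".toList, "8".toList),
   ("nine".toList, "9".toList)]

-- inner `for word, digit` loop body at start index i: line.startswith(word, i) with
-- 0 ≤ i ≤ len(line) is word.isPrefixOf (drop i); slices line[:i] / line[i+len(word):]
-- with nonnegative bounds are take/drop (PySem.List.slice_to_natCast/slice_from_natCast)
def pvTryAt (s : List Char) (i : Nat) : Option (List Char) :=
  match pvNumberWords.find? (fun p => p.1.isPrefixOf (s.drop i)) with
  | some p => some (s.take i ++ p.2 ++ s.drop (i + p.1.length))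
  | none => none

-- `for i in range(len(line), -1, -1)`: i counts down from len(line) to 0
def pvScan (s : List Char) : Nat → List Char
  | 0 => match pvTryAt s 0 with | some out => out | none => s
  | i+1 => match pvTryAt s (i+1) with | some out => out | none => pvScan s i

def replace_last_alt (line : String) : String :=
  String.ofList (pvScan line.toList line.toList.length)

-- ===== PRECONDITION & SPEC =====
def Spec_replace_last (line : String) (out : String) : Prop := out = replace_last_alt line
instance (line : String) (out : String) : Decidable (Spec_replace_last line out) := by unfold Spec_replace_last; infer_instance

-- ===== CLAIM (what is proved, stated in full; the proofs are below) =====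
def Claim_equal_replace_last : Prop := ∀ (line : String), Dom_replace_last line → Spec_replace_last line (replace_last line)

-- ===== LEMMAS AND PROOFS =====

-- facts about the ten number words (shared data of both sources)
theorem pv_words_ne_nil : ∀ p ∈ pvNumberWords, p.1 ≠ [] := by decide

theorem pv_words_prefix_eq : ∀ p ∈ pvNumberWords, ∀ q ∈ pvNumberWords, p.1 <+: q.1 → p = q := by
  decide

theorem pv_numberDict_get : ∀ p ∈ pvNumberWords, pvNumberDict.get? p.1 = some p.2 := by decide

theorem pv_entries_eq (s : List Char) :
    pvPosEntries s = pvNumberWords.map (fun p => (PySem.Chars.rfind s p.1, p.1)) := rfl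

-- two distinct number words cannot both start at the same position
theorem pv_unique_at (s : List Char) (i : Nat) {p q : List Char × List Char}
    (hp : p ∈ pvNumberWords) (hq : q ∈ pvNumberWords)
    (hp1 : p.1 <+: s.drop i) (hq1 : q.1 <+: s.drop i) : p = q := by
  rcases List.prefix_or_prefix_of_prefix hp1 hq1 with h | h
  · exact pv_words_prefix_eq p hp q hq h
  · exact (pv_words_prefix_eq q hq p hp h).symm

-- ---- rfind characterisation (PySem.Chars.rfind.go has no spec lemmas in the prelude) ----
theorem pv_rfind_go_spec (s sub : List Char) (k : Nat) :
    (PySem.Chars.rfind.go s sub k = -1 ∧ ∀ j ≤ k, ¬ sub <+: s.drop j) ∨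
    (∃ j : Nat, j ≤ k ∧ PySem.Chars.rfind.go s sub k = (j : Int) ∧ sub <+: s.drop j ∧
      ∀ i, j < i → i ≤ k → ¬ sub <+: s.drop i) := by
  induction k with
  | zero =>
      by_cases h : sub <+: s
      · right; exact ⟨0, le_refl _, by simp [PySem.Chars.rfind.go, List.isPrefixOf_iff_prefix, h],
          by simpa using h, fun i hi hi' => absurd (Nat.lt_of_lt_of_le hi hi') (by omega)⟩
      · left
        refine ⟨by simp [PySem.Chars.rfind.go, List.isPrefixOf_iff_prefix, h], ?_⟩
        intro j hj; interval_cases j; simpa using h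
  | succ n ih =>
      by_cases h : sub <+: s.drop (n+1)
      · right
        exact ⟨n+1, le_refl _, by simp [PySem.Chars.rfind.go, List.isPrefixOf_iff_prefix, h], h,
          fun i hi hi' => absurd hi (by omega)⟩
      · have hgo : PySem.Chars.rfind.go s sub (n+1) = PySem.Chars.rfind.go s sub n := by
          simp [PySem.Chars.rfind.go, List.isPrefixOf_iff_prefix, h]
        rcases ih with ⟨h1, h2⟩ | ⟨j, hj, he, hpre, hmax⟩
        · left
          refine ⟨hgo.trans h1, fun j hj => ?_⟩
          rcases Nat.lt_or_ge j (n+1) with hlt | hge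
          · exact h2 j (by omega)
          · have : j = n+1 := by omega
            subst this; exact h
        · right
          refine ⟨j, by omega, hgo.trans he, hpre, fun i hi hi' => ?_⟩
          rcases Nat.lt_or_ge i (n+1) with hlt | hge
          · exact hmax i hi (by omega)
          · have : i = n+1 := by omega
            subst this; exact h
termination_by k

theorem pv_rfind_spec (s sub : List Char) :
    (PySem.Chars.rfind s sub = -1 ∧ ∀ j, ¬ sub <+: s.drop j) ∨
    (∃ j : Nat, j ≤ s.length ∧ PySem.Chars.rfind s sub = (j : Int) ∧ sub <+: s.drop j ∧
      (∀ i, j < i → ¬ sub <+: s.drop i)) ∨ sub = [] := by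
  rcases pv_rfind_go_spec s sub s.length with ⟨h1, h2⟩ | ⟨j, hj, he, hpre, hmax⟩
  · by_cases hnil : sub = []
    · right; right; exact hnil
    · left
      refine ⟨h1, fun j => ?_⟩
      by_cases hle : j ≤ s.length
      · exact h2 j hle
      · rw [List.drop_eq_nil_of_le (by omega)]
        intro hp; exact hnil (List.prefix_nil.mp hp)
  · by_cases hnil : sub = []
    · right; right; exact hnil
    · right; left
      refine ⟨j, hj, he, hpre, fun i hi => ?_⟩
      by_cases hle : i ≤ s.length
      · exact hmax i hi hle
      · rw [List.drop_eq_nil_of_le (by omega)]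
        intro hp; exact hnil (List.prefix_nil.mp hp)

-- ---- dict insert-chain lemmas ----
theorem pv_mem_items_insert {d : PySem.Dict Int (List Char)} {p : Int × List Char}
    (k : Int) (v : List Char) (h : p ∈ (d.insert k v).items) : p = (k, v) ∨ p ∈ d.items := by
  unfold PySem.Dict.insert at h
  split at h
  · simp only [PySem.Dict.items] at h
    rcases List.mem_map.mp h with ⟨q, hq, he⟩
    by_cases hk : q.1 = k
    · left; rw [← he, if_pos (by simp [hk])]
    · right; rw [← he, if_neg (by simp [hk])]; exact hq
  · simp only [PySem.Dict.items] at h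
    rcases List.mem_append.mp h with h | h
    · right; exact h
    · left; simpa using h

theorem pv_mem_items_foldl {kvs : List (Int × List Char)} {d : PySem.Dict Int (List Char)}
    {p : Int × List Char}
    (h : p ∈ (kvs.foldl (fun d kv => d.insert kv.1 kv.2) d).items) :
    p ∈ d.items ∨ p ∈ kvs := by
  induction kvs generalizing d with
  | nil => exact Or.inl h
  | cons kv rest ih =>
      rcases ih (d := d.insert kv.1 kv.2) h with h' | h'
      · rcases pv_mem_items_insert kv.1 kv.2 h' with he | hd
        · right; rw [he]; simp
        · exact Or.inl hd
      · right; right; exact h'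

theorem pv_keys_insert {d : PySem.Dict Int (List Char)} (k k' : Int) (v : List Char) :
    k' ∈ ((d.insert k v).items.map (·.1)) ↔ k' = k ∨ k' ∈ (d.items.map (·.1)) := by
  unfold PySem.Dict.insert
  split
  · next hc =>
      simp only [PySem.Dict.items, List.map_map, List.mem_map]
      constructor
      · rintro ⟨q, hq, he⟩
        by_cases hk : q.1 = k
        · left; simp [hk] at he; omega
        · right; exact ⟨q, hq, by simpa [hk] using he⟩
      · rintro (he' | ⟨q, hq, he⟩)
        · obtain ⟨q, hq, hqe⟩ : ∃ q ∈ d.items, q.1 = k := by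
            simpa [PySem.Dict.contains] using hc
          exact ⟨q, hq, by simp [hqe, he']⟩
        · refine ⟨q, hq, ?_⟩
          by_cases hk : q.1 = k
          · simp [hk, ← he, hk]
          · simpa [hk] using he
  · simp only [PySem.Dict.items, List.map_append, List.mem_append]
    constructor
    · rintro (h | h)
      · exact Or.inr h
      · left; simpa using h
    · rintro (rfl | h)
      · right; simp
      · exact Or.inl h

theorem pv_keys_foldl {kvs : List (Int × List Char)} {d : PySem.Dict Int (List Char)} (k : Int) :
    k ∈ ((kvs.foldl (fun d kv => d.insert kv.1 kv.2) d).items.map (·.1)) ↔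
      k ∈ (d.items.map (·.1)) ∨ k ∈ kvs.map (·.1) := by
  induction kvs generalizing d with
  | nil => simp
  | cons kv rest ih =>
      simp only [List.foldl_cons]
      rw [ih, pv_keys_insert]
      simp only [List.map_cons, List.mem_cons]
      tauto

theorem pv_get?_foldl {kvs : List (Int × List Char)} {d : PySem.Dict Int (List Char)}
    {k : Int} {v : List Char}
    (hd : d.get? k = some v ∨ (d.get? k = none ∧ (k, v) ∈ kvs))
    (huniq : ∀ kv ∈ kvs, kv.1 = k → kv.2 = v) :
    (kvs.foldl (fun d kv => d.insert kv.1 kv.2) d).get? k = some v := by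
  induction kvs generalizing d with
  | nil =>
      rcases hd with h | ⟨_, h⟩
      · exact h
      · simp at h
  | cons kv rest ih =>
      simp only [List.foldl_cons]
      apply ih (d := d.insert kv.1 kv.2)
      · by_cases hk : kv.1 = k
        · left
          have hv : kv.2 = v := huniq kv (by simp) hk
          rw [← hk, hv]; exact PySem.Dict.get?_insert_self d kv.1 v
        · rw [PySem.Dict.get?_insert_of_ne d kv.2 (fun he => hk he.symm)]
          rcases hd with h | ⟨h1, h2⟩
          · exact Or.inl h
          · right
            refine ⟨h1, ?_⟩
            rcases List.mem_cons.mp h2 with he | hm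
            · exact absurd (congrArg Prod.fst he).symm hk
            · exact hm
      · exact fun kv' h' => huniq kv' (List.mem_cons_of_mem _ h')

-- ---- pvTryAt / pvScan characterisation ----
theorem pv_tryAt_none_iff (s : List Char) (i : Nat) :
    pvTryAt s i = none ↔ ∀ p ∈ pvNumberWords, ¬ p.1 <+: s.drop i := by
  cases hf : pvNumberWords.find? (fun p => p.1.isPrefixOf (s.drop i)) with
  | none =>
    simp only [pvTryAt, hf, true_iff]
    intro p hp hpre
    have := List.find?_eq_none.mp hf p hp
    rw [List.isPrefixOf_iff_prefix] at this
    exact this hpre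
  | some p =>
    simp only [pvTryAt, hf, reduceCtorEq, false_iff, not_forall]
    push_neg
    refine ⟨p, List.mem_of_find?_eq_some hf, ?_⟩
    have := List.find?_some hf
    rw [List.isPrefixOf_iff_prefix] at this
    exact this

theorem pv_scan_of_none (s : List Char) (n : Nat)
    (h : ∀ i ≤ n, pvTryAt s i = none) : pvScan s n = s := by
  induction n with
  | zero => simp [pvScan, h 0 (le_refl _)]
  | succ m ih =>
      simp only [pvScan, h (m+1) (le_refl _)]
      exact ih fun i hi => h i (by omega)

theorem pv_scan_of_some (s : List Char) (n M : Nat) (out : List Char)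
    (hM : M ≤ n) (hsome : pvTryAt s M = some out)
    (habove : ∀ i, M < i → i ≤ n → pvTryAt s i = none) : pvScan s n = out := by
  induction n with
  | zero =>
      have : M = 0 := by omega
      subst this
      simp [pvScan, hsome]
  | succ m ih =>
      rcases Nat.lt_or_ge M (m+1) with hlt | hge
      · simp only [pvScan, habove (m+1) hlt (le_refl _)]
        exact ih (by omega) fun i h1 h2 => habove i h1 (by omega)
      · have : M = m+1 := by omega
        subst this
        simp [pvScan, hsome]

theorem pv_max?_cons (x : Int) (xs : List Int) : ∃ m, PySem.List.max? (x :: xs) id = some m := by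
  induction xs generalizing x with
  | nil => exact ⟨x, rfl⟩
  | cons y ys ih =>
      by_cases h : x < y
      · obtain ⟨m, hm⟩ := ih y
        exact ⟨m, by simpa [PySem.List.max?, List.foldl, h] using hm⟩
      · obtain ⟨m, hm⟩ := ih x
        exact ⟨m, by simpa [PySem.List.max?, List.foldl, h] using hm⟩

-- no number word starts after the end of the string
theorem pv_no_match_past (s : List Char) : ∀ p ∈ pvNumberWords, ∀ i, s.length ≤ i → ¬ p.1 <+: s.drop i := by
  intro p hp i hi hpre
  rw [List.drop_eq_nil_of_le hi] at hpre
  exact pv_words_ne_nil p hp (List.prefix_nil.mp hpre)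

-- every item of the position dict is one of the ten entries
theorem pv_item_src {s : List Char} {kv : Int × List Char} (h : kv ∈ (pvPosDict s).items) :
    ∃ p ∈ pvNumberWords, kv = (PySem.Chars.rfind s p.1, p.1) := by
  rcases pv_mem_items_foldl (kvs := pvPosEntries s) (d := ⟨[]⟩) h with h' | h'
  · simp [PySem.Dict.items] at h'
  · rw [pv_entries_eq] at h'
    rcases List.mem_map.mp h' with ⟨p, hp, he⟩
    exact ⟨p, hp, he.symm⟩

-- ===== main proof =====
theorem pv_core_eq (s : List Char) : pvACore s = pvScan s s.length := by
  have hfold : ∀ (l : List (Int × List Char)),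
      l.foldl (fun acc kv => if kv.1 ≠ -1 then acc ++ [kv.1] else acc) ([] : List Int)
        = (l.filter (fun kv => decide (kv.1 ≠ -1))).map (·.1) := by
    intro l
    simpa using PySem.List.foldl_append_ite (l := l) (acc := ([] : List Int))
      (p := fun kv => kv.1 ≠ -1) (f := fun kv => kv.1)
  by_cases hAny : ∀ p ∈ pvNumberWords, PySem.Chars.rfind s p.1 = -1
  · -- no number word occurs anywhere: both sides return the line unchanged
    have hF : ((pvPosDict s).items.filter (fun kv => decide (kv.1 ≠ -1))) = [] := by
      rw [List.filter_eq_nil_iff]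
      intro kv hkv
      rcases pv_item_src hkv with ⟨p, hp, he⟩
      simp [he, hAny p hp]
    have hA : pvACore s = s := by
      simp only [pvACore, hfold, hF]
      rfl
    have hB : pvScan s s.length = s := by
      apply pv_scan_of_none
      intro i _
      rw [pv_tryAt_none_iff]
      intro p hp hpre
      rcases pv_rfind_spec s p.1 with ⟨_, h2⟩ | ⟨j, _, he, _, _⟩ | hnil
      · exact h2 i hpre
      · rw [hAny p hp] at he; omega
      · exact pv_words_ne_nil p hp hnil
    rw [hA, hB]
  · push_neg at hAny
    obtain ⟨p0, hp0, hr0⟩ := hAny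
    -- the filtered key list is nonempty
    have hk0 : PySem.Chars.rfind s p0.1 ∈ (pvPosEntries s).map (·.1) := by
      rw [pv_entries_eq, List.map_map]
      exact List.mem_map.mpr ⟨p0, hp0, rfl⟩
    obtain ⟨kv0, hkv0, hkv0e⟩ : ∃ kv ∈ (pvPosDict s).items, kv.1 = PySem.Chars.rfind s p0.1 := by
      have := (pv_keys_foldl (kvs := pvPosEntries s) (d := ⟨[]⟩) (PySem.Chars.rfind s p0.1)).mpr
        (Or.inr hk0)
      rcases List.mem_map.mp this with ⟨kv, hkv, he⟩
      exact ⟨kv, hkv, he⟩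
    have hF0 : kv0.1 ∈ ((pvPosDict s).items.filter (fun kv => decide (kv.1 ≠ -1))).map (·.1) := by
      refine List.mem_map.mpr ⟨kv0, List.mem_filter.mpr ⟨hkv0, by rw [hkv0e]; exact decide_eq_true hr0⟩, rfl⟩
    -- the max key m
    obtain ⟨m, hm⟩ : ∃ m, PySem.List.max?
        (((pvPosDict s).items.filter (fun kv => decide (kv.1 ≠ -1))).map (·.1)) id = some m := by
      obtain ⟨x, xs, hFl⟩ := List.exists_cons_of_ne_nil (List.ne_nil_of_mem hF0)
      rw [hFl]
      exact pv_max?_cons x xs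
    have hmmem := PySem.List.max?_mem hm
    have hmmax := PySem.List.max?_isMax hm
    -- m is the rfind of some word pm
    obtain ⟨pm, hpm, hrm⟩ : ∃ p ∈ pvNumberWords, PySem.Chars.rfind s p.1 = m := by
      rcases List.mem_map.mp hmmem with ⟨kv, hkv, he⟩
      rcases pv_item_src (List.mem_filter.mp hkv).1 with ⟨p, hp, hpe⟩
      exact ⟨p, hp, by rw [hpe] at he; exact he⟩
    have hmne : m ≠ -1 := by
      rcases List.mem_map.mp hmmem with ⟨kv, hkv, he⟩
      have := (List.mem_filter.mp hkv).2
      simp at this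
      omega
    -- rfind spec for pm
    obtain ⟨jM, hjMle, heM, hpreM, hmaxM⟩ :
        ∃ j : Nat, j ≤ s.length ∧ PySem.Chars.rfind s pm.1 = (j : Int) ∧ pm.1 <+: s.drop j ∧
          (∀ i, j < i → ¬ pm.1 <+: s.drop i) := by
      rcases pv_rfind_spec s pm.1 with ⟨h1, _⟩ | hspec | hnil
      · rw [hrm] at h1; exact absurd h1 hmne
      · exact hspec
      · exact absurd hnil (pv_words_ne_nil pm hpm)
    have hmj : m = (jM : Int) := by rw [← hrm, heM]
    -- every key of the dict is ≤ m: hence no word matches beyond jM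
    have hAbove : ∀ q ∈ pvNumberWords, ∀ i, jM < i → ¬ q.1 <+: s.drop i := by
      intro q hq i hi hpre
      rcases pv_rfind_spec s q.1 with ⟨_, h2⟩ | ⟨jq, _, heq, _, hmaxq⟩ | hnil
      · exact h2 i hpre
      · -- q's rfind key jq is in the filtered list, so jq ≤ m = jM; but i ≤ jq
        have hile : i ≤ jq := by
          by_contra hgt
          exact hmaxq i (by omega) hpre
        have hkq : PySem.Chars.rfind s q.1 ∈ (pvPosEntries s).map (·.1) := by
          rw [pv_entries_eq, List.map_map]
          exact List.mem_map.mpr ⟨q, hq, rfl⟩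
        obtain ⟨kvq, hkvq, hkvqe⟩ : ∃ kv ∈ (pvPosDict s).items, kv.1 = PySem.Chars.rfind s q.1 := by
          have := (pv_keys_foldl (kvs := pvPosEntries s) (d := ⟨[]⟩)
            (PySem.Chars.rfind s q.1)).mpr (Or.inr hkq)
          rcases List.mem_map.mp this with ⟨kv, hkv, he⟩
          exact ⟨kv, hkv, he⟩
        have hqF : kvq.1 ∈ ((pvPosDict s).items.filter (fun kv => decide (kv.1 ≠ -1))).map (·.1) := by
          refine List.mem_map.mpr ⟨kvq, List.mem_filter.mpr ⟨hkvq, ?_⟩, rfl⟩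
          rw [hkvqe, heq]
          simp
        have := hmmax _ hqF
        rw [hkvqe, heq] at this
        simp only [id] at this
        omega
      · exact pv_words_ne_nil q hq hnil
    have hjMlt : jM < s.length := by
      by_contra hge
      exact pv_no_match_past s pm hpm jM (by omega) hpreM
    -- B side: the scan stops exactly at jM with the pm replacement
    have hB : pvScan s s.length = s.take jM ++ pm.2 ++ s.drop (jM + pm.1.length) := by
      have hsome : pvTryAt s jM = some (s.take jM ++ pm.2 ++ s.drop (jM + pm.1.length)) := by
        unfold pvTryAt
        cases hf : pvNumberWords.find? (fun p => p.1.isPrefixOf (s.drop jM)) with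
        | none =>
            exfalso
            have := List.find?_eq_none.mp hf pm hpm
            rw [List.isPrefixOf_iff_prefix] at this
            exact this hpreM
        | some q =>
            have hqmem := List.mem_of_find?_eq_some hf
            have hqpre := List.find?_some hf
            rw [List.isPrefixOf_iff_prefix] at hqpre
            have : q = pm := pv_unique_at s jM hqmem hpm hqpre hpreM
            rw [this]
      exact pv_scan_of_some s s.length jM _ (by omega) hsome
        (fun i h1 h2 => (pv_tryAt_none_iff s i).mpr (fun q hq => hAbove q hq i h1))
    -- A side
    have hget : (pvPosDict s).get? m = some pm.1 := by
      apply pv_get?_foldl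
      · right
        refine ⟨rfl, ?_⟩
        rw [pv_entries_eq]
        exact List.mem_map.mpr ⟨pm, hpm, by rw [hrm]⟩
      · intro kv hkv hkve
        rcases (by rw [pv_entries_eq] at hkv; exact List.mem_map.mp hkv :
            ∃ p ∈ pvNumberWords, (PySem.Chars.rfind s p.1, p.1) = kv) with ⟨q, hq, hqe⟩
        have hrq : PySem.Chars.rfind s q.1 = m := by rw [← hkve, ← hqe]
        -- q matches at jM, hence q = pm
        rcases pv_rfind_spec s q.1 with ⟨h1, _⟩ | ⟨jq, _, heq, hpreq, _⟩ | hnil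
        · rw [hrq] at h1; exact absurd h1 hmne
        · have : jq = jM := by rw [hrq, hmj] at heq; omega
          rw [this] at hpreq
          have := pv_unique_at s jM hq hpm hpreq hpreM
          rw [← hqe, this]
        · exact absurd hnil (pv_words_ne_nil q hq)
    have hA : pvACore s = s.take jM ++ pm.2 ++ s.drop (jM + pm.1.length) := by
      have hmd : PySem.List.maxD
          (((pvPosDict s).items.filter (fun kv => decide (kv.1 ≠ -1))).map (·.1)) id (-1) = m := by
        simp only [PySem.List.maxD, hm, Option.getD_some]
      simp only [pvACore]
      rw [hfold, hmd, if_pos hmne, hget]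
      simp only [Option.getD_some]
      rw [pv_numberDict_get pm hpm]
      simp only [Option.getD_some]
      simp only [pvReplaceLastOcc]
      rw [heM, if_neg (by omega : ¬ ((jM : Int) = -1))]
      rw [PySem.Chars.join_cons_cons, PySem.Chars.join_singleton]
      simp
    rw [hA, hB]

-- ===== VERDICT (by name: the statement is the Claim_ definition above) =====
theorem replace_last_spec : Claim_equal_replace_last := by
  intro line _
  unfold Spec_replace_last replace_last replace_last_alt
  rw [pv_core_eq]
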